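-- pv_equiv track=rewrite | github.com/ssmisya/AdaReasoner | AdaDataCuration/frozen_lake/data_curation/sft_data_curation/path_verify/correctness_check/visualize_sharegpt_data.py | get_last_turn
-- ===== SOURCE A (Python) =====
-- from typing import List, Dict, Any
--
-- def get_last_turn(conversations: List[Dict[str, str]]) -> (str, str):
--     """获取最后一轮的人机对话"""
--     last_human = "N/A"
--     last_gpt = "N/A"
--
--     # 从后向前查找，找到第一个gpt和第一个human的对话
--     found_gpt = False
--     for conv in reversed(conversations):
--         if not found_gpt and conv.get("from") == "gpt":
--             last_gpt = conv.get("value", "N/A")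
--             found_gpt = True
--         elif found_gpt and conv.get("from") == "human":
--             last_human = conv.get("value", "N/A")
--             break
--
--     return last_human, last_gpt
-- ===== SOURCE B (Python) =====
-- def get_last_turn(conversations):
--     """获取最后一轮的人机对话"""
--     result = ("N/A", "N/A")
--     recent_human = "N/A"
--     for conv in conversations:
--         f = conv.get("from")
--         if f == "gpt":
--             result = (recent_human, conv.get("value", "N/A"))
--         elif f == "human":
--             recent_human = conv.get("value", "N/A")
--     return result
-- ===== Notes on version B (the rewrite author's own statement) =====
-- stated objective: alternative
-- what changed: A scans backward from the end with a found_gpt flag and an early break; B is a single forward fold that maintains the most recent human value and, at each gpt message, snapshots the (preceding human, gpt) pair, returning the last snapshot.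
import Mathlib
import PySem

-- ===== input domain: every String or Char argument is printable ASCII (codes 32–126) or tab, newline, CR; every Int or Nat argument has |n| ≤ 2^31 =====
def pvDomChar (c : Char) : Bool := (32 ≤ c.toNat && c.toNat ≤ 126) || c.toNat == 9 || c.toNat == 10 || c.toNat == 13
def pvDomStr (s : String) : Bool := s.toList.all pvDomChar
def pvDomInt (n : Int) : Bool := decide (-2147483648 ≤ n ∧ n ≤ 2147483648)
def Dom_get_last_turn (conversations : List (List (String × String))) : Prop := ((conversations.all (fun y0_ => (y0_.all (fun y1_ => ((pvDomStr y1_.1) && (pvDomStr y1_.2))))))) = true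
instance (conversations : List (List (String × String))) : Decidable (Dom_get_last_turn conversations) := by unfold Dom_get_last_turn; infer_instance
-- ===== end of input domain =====

-- B replaces A's backward early-exit scan by a single forward fold that tracks the most
-- recent human value and snapshots the (human, gpt) pair at each gpt (objective: alternative).


-- shared primitive: Python dict .get on an association list (first match), used by both ports
def aget? : List (String × String) → String → Option String
  | [], _ => none
  | (k, v) :: r, key => if k == key then some v else aget? r key

-- conv.get("value", "N/A")
def agetD (d : List (String × String)) (key dflt : String) : String :=
  (aget? d key).getD dflt

-- ===== PORT A =====
-- A's single backward loop with the found_gpt flag and break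
def loopA : List (List (String × String)) → String → String → Bool → String × String
  | [], lh, lg, _ => (lh, lg)
  | conv :: rest, lh, lg, found =>
    if !found && (aget? conv "from" == some "gpt") then
      loopA rest lh (agetD conv "value" "N/A") true
    else if found && (aget? conv "from" == some "human") then
      (agetD conv "value" "N/A", lg)   -- break
    else
      loopA rest lh lg found

def get_last_turn (conversations : List (List (String × String))) : String × String :=
  loopA conversations.reverse "N/A" "N/A" false

-- ===== PORT B =====
-- B's loop body: state = (result snapshot, most recent human value)
def stepB (s : (String × String) × String) (conv : List (String × String)) :
    (String × String) × String :=
  let f := aget? conv "from"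
  if f == some "gpt" then ((s.2, agetD conv "value" "N/A"), s.2)
  else if f == some "human" then (s.1, agetD conv "value" "N/A")
  else s

def get_last_turn_alt (conversations : List (List (String × String))) : String × String :=
  (conversations.foldl stepB (("N/A", "N/A"), "N/A")).1

-- ===== PRECONDITION & SPEC =====
def Spec_get_last_turn (conversations : List (List (String × String))) (out : String × String) : Prop := out = get_last_turn_alt conversations
instance (conversations : List (List (String × String))) (out : String × String) : Decidable (Spec_get_last_turn conversations out) := by unfold Spec_get_last_turn; infer_instance

-- ===== CLAIM (what is proved, stated in full; the proofs are below) =====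
def Claim_equal_get_last_turn : Prop := ∀ (conversations : List (List (String × String))), Dom_get_last_turn conversations → Spec_get_last_turn conversations (get_last_turn conversations)

-- ===== LEMMAS AND PROOFS =====

-- proof-side characterisations of A's backward scan
def humanC : List (List (String × String)) → String
  | [] => "N/A"
  | c :: r => if aget? c "from" == some "human" then agetD c "value" "N/A" else humanC r

def gptC : List (List (String × String)) → String × String
  | [] => ("N/A", "N/A")
  | conv :: rest =>
    if aget? conv "from" == some "gpt" then (humanC rest, agetD conv "value" "N/A")
    else gptC rest

-- once the gpt message is found, A's loop computes exactly the prefix human scan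
theorem loopA_found (l : List (List (String × String))) (lg : String) :
    loopA l "N/A" lg true = (humanC l, lg) := by
  induction l with
  | nil => rfl
  | cons c r ih =>
    simp only [loopA, humanC]
    by_cases h : aget? c "from" == some "human" <;> simp [h, ih]

theorem loopA_eq_gptC (l : List (List (String × String))) :
    loopA l "N/A" "N/A" false = gptC l := by
  induction l with
  | nil => rfl
  | cons c r ih =>
    simp only [loopA, gptC]
    by_cases h : aget? c "from" == some "gpt" <;> simp [h, ih, loopA_found]

-- B's forward fold state is exactly (answer for the prefix, last human value of the prefix)
theorem foldl_stepB (l : List (List (String × String))) :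
    l.foldl stepB (("N/A", "N/A"), "N/A") = (gptC l.reverse, humanC l.reverse) := by
  induction l using List.reverseRecOn with
  | nil => rfl
  | append_singleton l' c ih =>
    rw [List.foldl_append, ih, List.reverse_append]
    simp only [List.reverse_cons, List.reverse_nil, List.nil_append, List.singleton_append,
      gptC, humanC]
    by_cases hg : aget? c "from" == some "gpt"
    · have hh : ¬ (aget? c "from" == some "human") := by
        simp only [beq_iff_eq] at hg ⊢; simp [hg]
      simp [stepB, hg, hh]
    · by_cases hh : aget? c "from" == some "human" <;> simp [stepB, hg, hh]

-- ===== VERDICT (by name: the statement is the Claim_ definition above) =====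
theorem get_last_turn_spec : Claim_equal_get_last_turn := by
  intro conversations _
  unfold Spec_get_last_turn get_last_turn get_last_turn_alt
  rw [loopA_eq_gptC, foldl_stepB]
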